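-- pv_equiv track=rewrite | github.com/GoranTopic/SuperCias_Puppeteer | processing/functions/parse_supercias_forms.py | sort_by_y_axis
-- ===== SOURCE A (Python) =====
-- def sort_by_y_axis(cells):
--     # get all the elements that are on the same y0 position
--     yi = 1 # the index on the tuple of the y axis value
--     same_y_axis = {}
--     for cell in cells:
--         if cell[yi] not in same_y_axis:
--             same_y_axis[cell[yi]] = []
--         same_y_axis[cell[yi]].append(cell)
--     # make into a list
--     same_y_axis = list(same_y_axis.values())
--     # sort by the y value
--     same_y_axis.sort(key=lambda x: x[0][yi])
--     return same_y_axis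
-- ===== SOURCE B (Python) =====
-- def sort_by_y_axis(cells):
--     # the sorted distinct y values, then one filtering pass per y value
--     ys = sorted({c[1] for c in cells})
--     return [[c for c in cells if c[1] == y] for y in ys]
-- ===== Notes on version B (the rewrite author's own statement) =====
-- stated objective: simpler
-- what changed: Instead of accumulating groups in a dict keyed by y and then sorting the group lists by their first element's y, B sorts the distinct y values once and builds each group by filtering the input for that y.
import Mathlib
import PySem

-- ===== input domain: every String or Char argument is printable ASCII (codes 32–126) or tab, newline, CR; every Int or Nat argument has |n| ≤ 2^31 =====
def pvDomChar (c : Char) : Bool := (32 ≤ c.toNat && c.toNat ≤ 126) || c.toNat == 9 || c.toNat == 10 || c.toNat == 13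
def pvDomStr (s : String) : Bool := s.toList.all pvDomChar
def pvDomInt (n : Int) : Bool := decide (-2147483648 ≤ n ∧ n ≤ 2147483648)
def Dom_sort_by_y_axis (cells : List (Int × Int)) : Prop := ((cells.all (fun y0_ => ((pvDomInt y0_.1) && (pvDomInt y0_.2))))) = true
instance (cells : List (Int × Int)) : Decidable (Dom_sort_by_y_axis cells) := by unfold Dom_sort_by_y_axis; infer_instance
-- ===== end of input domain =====

-- B replaces A's dict-of-groups-then-sort-the-groups with: sort the distinct y values once,
-- then build each group by filtering the input for that y (simpler decomposition, same result).


-- ===== PORT A =====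
-- literal transliteration: dict keyed by cell[1] (insertion order), append each cell to its
-- group, then sort the list of groups by x[0][1].  Every stored group is nonempty, so Python's
-- x[0] never raises; it is ported as pyGetD with an arbitrary default (exact on nonempty lists).
def sort_by_y_axis (cells : List (Int × Int)) : List (List (Int × Int)) :=
  let same_y_axis : PySem.Dict Int (List (Int × Int)) :=
    cells.foldl (fun d cell =>
      let d := if d.contains cell.2 then d else d.insert cell.2 []
      d.modify cell.2 [] (fun g => g ++ [cell])) ⟨[]⟩
  PySem.List.sorted same_y_axis.values (fun x => (PySem.List.pyGetD x 0 (0, 0)).2)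

-- ===== PORT B =====
-- sorted({c[1] for c in cells}), then one filter pass per distinct y value
def sort_by_y_axis_alt (cells : List (Int × Int)) : List (List (Int × Int)) :=
  let ys := PySem.List.sorted (PySem.Set.ofList (cells.map (fun c => c.2))) id
  ys.map (fun y => cells.filter (fun c => c.2 == y))

-- ===== PRECONDITION & SPEC =====
def Spec_sort_by_y_axis (cells : List (Int × Int)) (out : List (List (Int × Int))) : Prop := out = sort_by_y_axis_alt cells
instance (cells : List (Int × Int)) (out : List (List (Int × Int))) : Decidable (Spec_sort_by_y_axis cells out) := by unfold Spec_sort_by_y_axis; infer_instance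

-- ===== CLAIM (what is proved, stated in full; the proofs are below) =====
def Claim_equal_sort_by_y_axis : Prop := ∀ (cells : List (Int × Int)), Dom_sort_by_y_axis cells → Spec_sort_by_y_axis cells (sort_by_y_axis cells)

-- ===== LEMMAS AND PROOFS =====

-- the group of cells with a given y value, relative to the whole input
def pvGrp (cells : List (Int × Int)) (y : Int) : List (Int × Int) :=
  cells.filter (fun c => c.2 == y)

-- the distinct y values in first-occurrence order
def pvKeys (cells : List (Int × Int)) : List Int :=
  PySem.Set.ofList (cells.map (fun c => c.2))

-- A's loop body, named so the invariant can speak about the fold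
def pvStep (d : PySem.Dict Int (List (Int × Int))) (cell : Int × Int) :
    PySem.Dict Int (List (Int × Int)) :=
  let d := if d.contains cell.2 then d else d.insert cell.2 []
  d.modify cell.2 [] (fun g => g ++ [cell])

lemma pvKeys_append (l : List (Int × Int)) (c : Int × Int) :
    pvKeys (l ++ [c]) = PySem.Set.add (pvKeys l) c.2 := by
  simp [pvKeys, PySem.Set.ofList]

lemma pvGrp_append (l : List (Int × Int)) (c : Int × Int) (y : Int) :
    pvGrp (l ++ [c]) y = pvGrp l y ++ (if c.2 == y then [c] else []) := by
  by_cases h : c.2 = y <;> simp [pvGrp, List.filter_append, h]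

lemma pvFind (K : List Int) (G : Int → List (Int × Int)) (k : Int) (hk : k ∈ K) :
    List.find? (fun p => p.1 == k) (K.map (fun y => (y, G y))) = some (k, G k) := by
  induction K with
  | nil => cases hk
  | cons a K ih =>
    by_cases h : a = k
    · subst h; simp
    · rcases List.mem_cons.mp hk with h' | h'
      · exact absurd h'.symm h
      · simp [h, ih h']

lemma pvFind_none (K : List Int) (G : Int → List (Int × Int)) (k : Int) (hk : k ∉ K) :
    List.find? (fun p => p.1 == k) (K.map (fun y => (y, G y))) = none := by
  rw [List.find?_eq_none]
  rintro ⟨y, g⟩ hm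
  simp only [List.mem_map] at hm
  obtain ⟨y', hy', he⟩ := hm
  cases he
  simp only [beq_iff_eq]
  rintro rfl
  exact hk hy'

lemma pvContains (K : List Int) (G : Int → List (Int × Int)) (k : Int) :
    (List.any (K.map (fun y => (y, G y))) (fun p => p.1 == k)) = decide (k ∈ K) := by
  induction K with
  | nil => simp
  | cons a K ih =>
    simp only [List.map_cons, List.any_cons, ih, List.mem_cons]
    by_cases h : a = k
    · subst h; simp
    · have h' : ¬ k = a := fun hh => h hh.symm
      simp [h, h']

lemma pvStep_items_mem (K : List Int) (G : Int → List (Int × Int)) (c : Int × Int)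
    (hmem : c.2 ∈ K) :
    (pvStep ⟨K.map (fun y => (y, G y))⟩ c).items
      = K.map (fun y => (y, G y ++ if c.2 == y then [c] else [])) := by
  have hc : (PySem.Dict.contains ⟨K.map (fun y => (y, G y))⟩ c.2) = true := by
    simp only [PySem.Dict.contains]
    rw [pvContains]; simpa
  simp only [pvStep, PySem.Dict.modify, PySem.Dict.getD, PySem.Dict.get?, hc,
    PySem.Dict.insert, if_true]
  rw [pvFind _ _ _ hmem]
  simp only [Option.map_some, Option.getD_some, List.map_map]
  apply List.map_congr_left
  intro y hy
  by_cases hyc : y = c.2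
  · subst hyc; simp
  · have h' : ¬ c.2 = y := fun hh => hyc hh.symm
    simp [Function.comp, hyc, h']

lemma pvStep_items_new (K : List Int) (G : Int → List (Int × Int)) (c : Int × Int)
    (hmem : c.2 ∉ K) :
    (pvStep ⟨K.map (fun y => (y, G y))⟩ c).items
      = K.map (fun y => (y, G y)) ++ [(c.2, [c])] := by
  have hc : (PySem.Dict.contains ⟨K.map (fun y => (y, G y))⟩ c.2) = false := by
    simp only [PySem.Dict.contains]
    rw [pvContains]; simpa
  simp only [pvStep, hc, if_false, Bool.false_eq_true]
  have hins : (PySem.Dict.insert ⟨K.map (fun y => (y, G y))⟩ c.2 [])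
      = (⟨K.map (fun y => (y, G y)) ++ [(c.2, [])]⟩ : PySem.Dict Int (List (Int × Int))) := by
    simp [PySem.Dict.insert, hc]
  rw [hins]
  have hc2 : (PySem.Dict.contains
      (⟨K.map (fun y => (y, G y)) ++ [(c.2, [])]⟩ : PySem.Dict Int (List (Int × Int))) c.2)
      = true := by
    simp [PySem.Dict.contains]
  simp only [PySem.Dict.modify, PySem.Dict.getD, PySem.Dict.get?, hc2, PySem.Dict.insert, if_true]
  rw [List.find?_append, pvFind_none _ _ _ hmem]
  simp only [Option.none_or, List.find?_cons, beq_self_eq_true]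
  simp only [Option.map_some, Option.getD_some, List.map_append, List.nil_append]
  congr 1
  · rw [List.map_map]
    apply List.map_congr_left
    intro y hy
    have hne : ¬ (y == c.2) = true := by
      simp only [beq_iff_eq]; rintro rfl; exact hmem hy
    simp [Function.comp, hne]
  · simp

-- loop invariant of A: after the whole fold the dict holds, keyed in first-occurrence order,
-- exactly the filter groups of the full input
lemma pvFold_items (cells : List (Int × Int)) :
    (cells.foldl pvStep ⟨[]⟩).items
      = (pvKeys cells).map (fun y => (y, pvGrp cells y)) := by
  induction cells using List.reverseRecOn with
  | nil => simp [pvKeys, PySem.Set.ofList, PySem.Set.empty]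
  | append_singleton l c ih =>
    rw [List.foldl_append, List.foldl_cons, List.foldl_nil]
    have hd : l.foldl pvStep ⟨[]⟩
        = (⟨(pvKeys l).map (fun y => (y, pvGrp l y))⟩ : PySem.Dict Int (List (Int × Int))) := by
      cases hE : l.foldl pvStep ⟨[]⟩ with
      | mk its => rw [hE] at ih; simpa using ih
    rw [hd, pvKeys_append]
    have hfun : (fun y => (y, pvGrp (l ++ [c]) y))
        = (fun y => (y, pvGrp l y ++ if c.2 == y then [c] else [])) :=
      funext (fun y => by rw [pvGrp_append])
    by_cases hmem : c.2 ∈ pvKeys l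
    · have hadd : PySem.Set.add (pvKeys l) c.2 = pvKeys l := by
        simp [PySem.Set.add, hmem]
      rw [hadd, hfun, pvStep_items_mem _ _ _ hmem]
    · have hadd : PySem.Set.add (pvKeys l) c.2 = pvKeys l ++ [c.2] := by
        simp [PySem.Set.add, hmem]
      rw [hadd, hfun, pvStep_items_new _ _ _ hmem, List.map_append]
      congr 1
      · apply List.map_congr_left
        intro y hy
        have hne : ¬ (c.2 == y) = true := by
          simp only [beq_iff_eq]; rintro rfl; exact hmem hy
        simp [hne]
      · have hG : pvGrp l c.2 = [] := by
          rw [pvGrp, List.filter_eq_nil_iff]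
          intro a ha
          simp only [beq_iff_eq]
          intro hae
          exact hmem ((PySem.Set.mem_ofList _ _).mpr (List.mem_map.mpr ⟨a, ha, hae⟩))
        simp [hG]

-- A's sort key evaluated on a group: the first element of the group carries the group's y
lemma pvKey_grp (cells : List (Int × Int)) (y : Int) (hy : y ∈ pvKeys cells) :
    (PySem.List.pyGetD (pvGrp cells y) 0 (0, 0)).2 = y := by
  rw [pvKeys, PySem.Set.mem_ofList] at hy
  obtain ⟨c, hc, hcy⟩ := List.mem_map.mp hy
  have hne : pvGrp cells y ≠ [] := by
    intro h
    have : c ∈ pvGrp cells y := List.mem_filter.mpr ⟨hc, by simp [hcy]⟩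
    rw [h] at this
    cases this
  cases hg : pvGrp cells y with
  | nil => exact absurd hg hne
  | cons a t =>
    have ha : a ∈ pvGrp cells y := by rw [hg]; exact List.mem_cons_self
    have := (List.mem_filter.mp ha).2
    simp only [beq_iff_eq] at this
    simpa [PySem.List.pyGetD, PySem.List.pyGet?, PySem.List.pyIdx?] using this

theorem pv_main (cells : List (Int × Int)) :
    sort_by_y_axis cells = sort_by_y_axis_alt cells := by
  show PySem.List.sorted (cells.foldl pvStep ⟨[]⟩).values (fun x => (PySem.List.pyGetD x 0 (0, 0)).2)
      = (PySem.List.sorted (pvKeys cells) id).map (pvGrp cells)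
  have hvals : (cells.foldl pvStep ⟨[]⟩).values = (pvKeys cells).map (pvGrp cells) := by
    simp [PySem.Dict.values, pvFold_items, List.map_map, Function.comp]
  rw [hvals]
  apply PySem.List.sorted_eq_of_perm_of_pairwise_lt
  · exact List.Perm.map _ (PySem.List.sorted_perm (pvKeys cells) id false)
  · rw [List.pairwise_map]
    have hsub : ∀ a ∈ PySem.List.sorted (pvKeys cells) id, a ∈ pvKeys cells :=
      fun a ha => (PySem.List.sorted_perm (pvKeys cells) id false).mem_iff.mp ha
    have hle : List.Pairwise (fun a b => a ≤ b) (PySem.List.sorted (pvKeys cells) id) := by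
      simpa using PySem.List.sorted_pairwise (pvKeys cells) id
    have hnd : List.Nodup (PySem.List.sorted (pvKeys cells) id) :=
      (PySem.List.sorted_perm (pvKeys cells) id false).nodup_iff.mpr
        (PySem.Set.nodup_ofList _)
    have hlt : List.Pairwise (fun a b => a < b) (PySem.List.sorted (pvKeys cells) id) :=
      (hle.and hnd).imp (fun h => lt_of_le_of_ne h.1 h.2)
    refine hlt.imp_of_mem ?_
    intro a b ha hb hab
    rwa [pvKey_grp cells a (hsub a ha), pvKey_grp cells b (hsub b hb)]

-- ===== VERDICT (by name: the statement is the Claim_ definition above) =====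
theorem sort_by_y_axis_spec : Claim_equal_sort_by_y_axis := by
  intro cells _
  exact pv_main cells
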